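-- pv_equiv track=rewrite | github.com/leejohy-0223/python-solve | python/algorithm_study/pro77886/pro77886.py | solution
-- ===== SOURCE A (Python) =====
-- def solution(s):
--     answers = []
--     chkTemplate = ["1", "1"]
--
--     for strings in s:
--         stack = []
--         count_110 = 0
--         for chr in strings:
--             if stack[-2:] == chkTemplate and chr == "0":
--                 count_110 += 1
--                 stack.pop()
--                 stack.pop()
--             else:
--                 stack.append(chr)
--
--         # find first index that is not zero
--         count_1 = 0
--         for idx in range(len(stack) - 1, -1, -1):
--             if stack[idx] == '0':
--                 break
--             count_1 += 1
--
--         # count_1 means 1이 끝나는 곳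
--         answer = "".join(stack[:len(stack) - count_1]) + "110" * count_110 + "1" * count_1
--         answers.append(answer)
--
--     return answers
-- ===== SOURCE B (Python) =====
-- def solution(s):
--     answers = []
--     for original in s:
--         reduced = original
--         while '110' in reduced:
--             reduced = reduced.replace('110', '')
--         count_110 = (len(original) - len(reduced)) // 3
--         i = reduced.rfind('0')
--         answers.append(reduced[:i + 1] + '110' * count_110 + '1' * (len(reduced) - i - 1))
--     return answers
-- ===== Notes on version B (the rewrite author's own statement) =====
-- stated objective: simpler
-- what changed: Replaces the explicit character stack (manual top-two check, pops, and a 110 counter) by iterated whole-string str.replace('110','') until fixpoint, derives the 110-count from the length difference, and finds the trailing-ones boundary with rfind('0') instead of a backward index loop.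
import Mathlib
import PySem

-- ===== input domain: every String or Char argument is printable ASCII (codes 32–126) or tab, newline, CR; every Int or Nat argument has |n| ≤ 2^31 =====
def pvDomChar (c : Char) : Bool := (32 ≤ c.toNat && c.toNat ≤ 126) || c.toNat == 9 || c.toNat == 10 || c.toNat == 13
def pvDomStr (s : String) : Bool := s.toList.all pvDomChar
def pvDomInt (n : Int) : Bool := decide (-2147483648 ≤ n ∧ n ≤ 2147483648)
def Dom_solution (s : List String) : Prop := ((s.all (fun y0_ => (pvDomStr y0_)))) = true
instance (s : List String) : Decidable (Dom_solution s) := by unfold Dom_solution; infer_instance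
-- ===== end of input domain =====

-- B replaces A's explicit character stack by iterated whole-string replace('110','') until
-- fixpoint, a length-difference count and rfind('0') for the trailing-ones boundary (simpler).

-- ===== PORT A =====
-- the backward `for idx in range(len(stack)-1,-1,-1): … break` loop, as recursion over the reversed stack
def pvTailCount : List Char → Nat
  | [] => 0
  | c :: r => if c = '0' then 0 else pvTailCount r + 1

-- one loop step; `stack[-2:]` is `drop (len-2)` (exact for all lengths); the counter is a
-- nonnegative int, carried as Nat
def pvAStep (p : List Char × Nat) (c : Char) : List Char × Nat :=
  if p.1.drop (p.1.length - 2) = ['1', '1'] ∧ c = '0' then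
    (p.1.dropLast.dropLast, p.2 + 1)
  else (p.1 ++ [c], p.2)

def pvAOne (t : String) : String :=
  let st := t.toList.foldl pvAStep ([], 0)
  let count1 := pvTailCount st.1.reverse
  String.mk (st.1.take (st.1.length - count1) ++
    (List.replicate st.2 ['1', '1', '0']).flatten ++ List.replicate count1 '1')

def solution (s : List String) : List String := s.map pvAOne

-- ===== PORT B =====
-- structural form of one `replace('110','')` pass; used only to justify termination of pvBReduce
def pvRepl : List Char → List Char
  | [] => []
  | c :: t =>
    if ['1', '1', '0'].isPrefixOf (c :: t) then pvRepl ((c :: t).drop 3) else c :: pvRepl t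
termination_by l => l.length
decreasing_by all_goals first | (simp; omega) | simp

theorem pvRepl_length_le (l : List Char) : (pvRepl l).length ≤ l.length := by
  fun_induction pvRepl l with
  | case1 => simp
  | case2 c t h ih => simp at ih ⊢; omega
  | case3 c t h ih => simpa using ih

theorem pvRepl_length_lt (l : List Char) (h : ['1', '1', '0'] <:+: l) :
    (pvRepl l).length < l.length := by
  fun_induction pvRepl l with
  | case1 => simp at h
  | case2 c t hp ih =>
      have := pvRepl_length_le ((c :: t).drop 3)
      simp at this ⊢; omega
  | case3 c t hp ih =>
      rcases (List.infix_cons_iff).1 h with hpre | hinf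
      · exact absurd (List.isPrefixOf_iff_prefix.2 hpre) (by simpa using hp)
      · have := ih hinf; simpa using Nat.succ_lt_succ this

theorem pvReplaceGo_eq (fuel : Nat) : ∀ (l acc : List Char), l.length ≤ fuel →
    PySem.Chars.replace.go ['1', '1', '0'] [] fuel l acc = acc.reverse ++ pvRepl l := by
  induction fuel with
  | zero =>
      intro l acc h
      have : l = [] := List.eq_nil_of_length_eq_zero (Nat.le_zero.1 h)
      subst this; simp [PySem.Chars.replace.go, pvRepl]
  | succ fuel ih =>
      intro l acc h
      match l with
      | [] => simp [PySem.Chars.replace.go, pvRepl]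
      | c :: t =>
        rw [PySem.Chars.replace.go]
        by_cases hp : ['1', '1', '0'].isPrefixOf (c :: t)
        · rw [if_pos hp, pvRepl, if_pos hp]
          have hlen : ((c :: t).drop 3).length ≤ fuel := by simp at h ⊢; omega
          simpa using ih _ acc hlen
        · rw [if_neg hp, pvRepl, if_neg hp]
          have hlen : t.length ≤ fuel := by simp at h; omega
          rw [ih t (c :: acc) hlen]; simp

theorem pvReplace_eq_repl (l : List Char) :
    PySem.Chars.replace l ['1', '1', '0'] [] = pvRepl l := by
  rw [PySem.Chars.replace]
  simp only [List.isEmpty_iff, if_neg (by simp : ¬(['1','1','0'] : List Char) = [])]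
  simpa using pvReplaceGo_eq l.length l [] le_rfl

theorem pvReplace_length_lt (l : List Char)
    (h : PySem.Chars.isIn ['1', '1', '0'] l = true) :
    (PySem.Chars.replace l ['1', '1', '0'] []).length < l.length := by
  rw [pvReplace_eq_repl]
  exact pvRepl_length_lt l ((PySem.Chars.isIn_iff_infix _ _).1 h)

-- the `while '110' in reduced:` loop
def pvBReduce (l : List Char) : List Char :=
  if h : PySem.Chars.isIn ['1', '1', '0'] l then
    pvBReduce (PySem.Chars.replace l ['1', '1', '0'] [])
  else l
termination_by l.length
decreasing_by exact pvReplace_length_lt l h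

def pvBOne (t : String) : String :=
  let r := pvBReduce t.toList
  let c := PySem.Int.floordiv ((t.toList.length : Int) - (r.length : Int)) 3
  let i := PySem.Chars.rfind r ['0']
  String.mk (PySem.List.slice r none (some (i + 1)) ++
    (List.replicate c.toNat ['1', '1', '0']).flatten ++
    List.replicate ((r.length : Int) - i - 1).toNat '1')

def solution_alt (s : List String) : List String := s.map pvBOne

-- ===== PRECONDITION & SPEC =====
def Spec_solution (s : List String) (out : List String) : Prop := out = solution_alt s
instance (s : List String) (out : List String) : Decidable (Spec_solution s out) := by unfold Spec_solution; infer_instance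

-- ===== CLAIM (what is proved, stated in full; the proofs are below) =====
def Claim_equal_solution : Prop := ∀ (s : List String), Dom_solution s → Spec_solution s (solution s)

-- ===== LEMMAS AND PROOFS =====

-- the stack component of the fold does not depend on the counter
theorem pvFold_fst_count (l : List Char) : ∀ (st : List Char) (k k' : Nat),
    (List.foldl pvAStep (st, k) l).1 = (List.foldl pvAStep (st, k') l).1 := by
  induction l with
  | nil => intro st k k'; simp
  | cons c t ih =>
      intro st k k'
      simp only [List.foldl_cons, pvAStep]
      by_cases h : st.drop (st.length - 2) = ['1', '1'] ∧ c = '0'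
      · simp only [if_pos h]; exact ih _ _ _
      · simp only [if_neg h]; exact ih _ _ _

-- processing a literal "110" from any state returns to the same stack, counter + 1
theorem pvStep110 (st : List Char) (k : Nat) (r : List Char) :
    List.foldl pvAStep (st, k) ('1' :: '1' :: '0' :: r) = List.foldl pvAStep (st, k + 1) r := by
  have h1 : pvAStep (st, k) '1' = (st ++ ['1'], k) := by simp [pvAStep]
  have h2 : pvAStep (st ++ ['1'], k) '1' = (st ++ ['1', '1'], k) := by simp [pvAStep]
  have h3 : pvAStep (st ++ ['1', '1'], k) '0' = (st, k + 1) := by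
    simp only [pvAStep]
    rw [if_pos]
    · congr 1
      rw [show st ++ ['1', '1'] = (st ++ ['1']) ++ ['1'] by simp,
        List.dropLast_concat, List.dropLast_concat]
    · constructor
      · rw [show (st ++ ['1', '1']).length - 2 = st.length by simp]
        simp
      · trivial
  simp only [List.foldl_cons, h1, h2, h3]

-- deleting the "110" occurrences of one replace pass does not change the final stack
theorem pvFold_repl (l : List Char) : ∀ (st : List Char) (k : Nat),
    (List.foldl pvAStep (st, k) (pvRepl l)).1 = (List.foldl pvAStep (st, k) l).1 := by
  fun_induction pvRepl l with
  | case1 => intro st k; rfl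
  | case2 c t hp ih =>
      intro st k
      obtain ⟨u, hu⟩ := List.isPrefixOf_iff_prefix.1 hp
      have hdrop : (c :: t).drop 3 = u := by rw [← hu]; rfl
      rw [hdrop] at ih ⊢
      rw [← hu]
      show (List.foldl pvAStep (st, k) (pvRepl u)).1
          = (List.foldl pvAStep (st, k) ('1' :: '1' :: '0' :: u)).1
      rw [pvStep110, ih st k, pvFold_fst_count]
  | case3 c t hp ih =>
      intro st k
      simp only [List.foldl_cons]
      have := ih (pvAStep (st, k) c).1 (pvAStep (st, k) c).2
      simpa using this

-- on a 110-free remainder the stack only grows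
theorem pvFold_clean (l : List Char) : ∀ (st : List Char) (k : Nat),
    ¬ ['1', '1', '0'] <:+: (st ++ l) → List.foldl pvAStep (st, k) l = (st ++ l, k) := by
  induction l with
  | nil => intro st k _; simp
  | cons c t ih =>
      intro st k hfree
      have hcond : ¬ (st.drop (st.length - 2) = ['1', '1'] ∧ c = '0') := by
        rintro ⟨h1, h2⟩
        apply hfree
        refine ⟨st.take (st.length - 2), t, ?_⟩
        subst h2
        calc st.take (st.length - 2) ++ ['1', '1', '0'] ++ t
            = st.take (st.length - 2) ++ (['1', '1'] ++ ('0' :: t)) := by simp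
          _ = (st.take (st.length - 2) ++ st.drop (st.length - 2)) ++ ('0' :: t) := by
              rw [h1]; simp
          _ = st ++ '0' :: t := by rw [List.take_append_drop]
      simp only [List.foldl_cons, pvAStep, if_neg hcond]
      rw [ih (st ++ [c]) k (by simpa using hfree)]
      simp

-- length invariant: 3·count + |stack| = |input|
theorem pvFold_len (l : List Char) : ∀ (st : List Char) (k : Nat),
    3 * (List.foldl pvAStep (st, k) l).2 + (List.foldl pvAStep (st, k) l).1.length
      = 3 * k + st.length + l.length := by
  induction l with
  | nil => intro st k; simp
  | cons c t ih =>
      intro st k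
      simp only [List.foldl_cons, pvAStep]
      by_cases h : st.drop (st.length - 2) = ['1', '1'] ∧ c = '0'
      · simp only [if_pos h]
        have hlen : 2 ≤ st.length := by
          have := congrArg List.length h.1
          simp at this; omega
        have := ih st.dropLast.dropLast (k + 1)
        rw [this]
        simp; omega
      · simp only [if_neg h]
        have := ih (st ++ [c]) k
        rw [this]; simp; omega

-- pvBReduce produces a 110-free string with the same final stack
theorem pvBReduce_not_infix (l : List Char) : ¬ ['1', '1', '0'] <:+: pvBReduce l := by
  fun_induction pvBReduce l with
  | case1 l h ih => exact ih
  | case2 l h => exact (PySem.Chars.isIn_eq_false_iff _ _).1 (by simpa using h)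

theorem pvBReduce_stack (l : List Char) :
    (List.foldl pvAStep ([], 0) (pvBReduce l)).1 = (List.foldl pvAStep ([], 0) l).1 := by
  fun_induction pvBReduce l with
  | case1 l h ih =>
      rw [ih, pvReplace_eq_repl, pvFold_repl]
  | case2 l h => rfl

-- pvTailCount counts the leading non-'0' prefix
theorem pvTailCount_le (l : List Char) : pvTailCount l ≤ l.length := by
  induction l with
  | nil => simp [pvTailCount]
  | cons c t ih =>
      simp only [pvTailCount]
      split
      · simp
      · simp; omega

theorem pvTailCount_lt (l : List Char) : ∀ i (h : i < l.length), i < pvTailCount l → l[i] ≠ '0' := by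
  induction l with
  | nil => intro i h; simp at h
  | cons c t ih =>
      intro i h hi
      simp only [pvTailCount] at hi
      by_cases hc : c = '0'
      · rw [if_pos hc] at hi; omega
      · rw [if_neg hc] at hi
        match i with
        | 0 => simpa using hc
        | i + 1 =>
          simp only [List.getElem_cons_succ]
          exact ih i (by simpa using h) (by omega)

theorem pvTailCount_stop (l : List Char) (h : pvTailCount l < l.length) :
    l[pvTailCount l] = '0' := by
  induction l with
  | nil => simp at h
  | cons c t ih =>
      by_cases hc : c = '0'
      · simp [pvTailCount, hc]
      · simp only [pvTailCount, if_neg hc] at h ⊢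
        simpa using ih (by simpa using h)

-- rfind('0') + 1 = length − (number of trailing non-'0' characters)
theorem pvRfind_eq (r : List Char) :
    PySem.Chars.rfind r ['0'] + 1 = ((r.length - pvTailCount r.reverse : Nat) : Int) := by
  have ht_le : pvTailCount r.reverse ≤ r.length := by
    simpa using pvTailCount_le r.reverse
  have hF1 : ∀ j (hj : j < r.length), r.length - pvTailCount r.reverse ≤ j → r[j] ≠ '0' := by
    intro j hj hdj
    have hidx : r.length - 1 - j < r.reverse.length := by simp; omega
    have hlt : r.length - 1 - j < pvTailCount r.reverse := by omega
    have := pvTailCount_lt r.reverse _ hidx hlt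
    rw [List.getElem_reverse] at this
    rwa [getElem_congr rfl (show r.length - 1 - (r.length - 1 - j) = j by omega) (by omega)] at this
  have hF2 : 1 ≤ r.length - pvTailCount r.reverse →
      ∀ (hd : r.length - pvTailCount r.reverse - 1 < r.length),
        r[r.length - pvTailCount r.reverse - 1] = '0' := by
    intro h1 hd
    have hstop : pvTailCount r.reverse < r.reverse.length := by simp; omega
    have := pvTailCount_stop r.reverse hstop
    rw [List.getElem_reverse] at this
    rwa [getElem_congr rfl (show r.length - 1 - pvTailCount r.reverse
        = r.length - pvTailCount r.reverse - 1 by omega) (by omega)] at this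
  have hpre : ∀ j, (['0'].isPrefixOf (r.drop j)) = true ↔ ∃ h : j < r.length, r[j] = '0' := by
    intro j
    by_cases hj : j < r.length
    · rw [List.drop_eq_getElem_cons hj]
      constructor
      · intro h
        exact ⟨hj, (List.cons_prefix_cons.1 (List.isPrefixOf_iff_prefix.1 h)).1.symm⟩
      · rintro ⟨_, h0⟩
        exact List.isPrefixOf_iff_prefix.2
          (List.cons_prefix_cons.2 ⟨h0.symm, List.nil_prefix⟩)
    · rw [List.drop_eq_nil_iff.2 (by omega)]
      simp [List.isPrefixOf]
      omega
  have go_spec : ∀ j, r.length - pvTailCount r.reverse - 1 ≤ j → j ≤ r.length →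
      PySem.Chars.rfind.go r ['0'] j =
        if r.length - pvTailCount r.reverse = 0 then -1
        else ((r.length - pvTailCount r.reverse - 1 : Nat) : Int) := by
    intro j
    induction j with
    | zero =>
        intro hlo _
        simp only [PySem.Chars.rfind.go]
        by_cases hd : r.length - pvTailCount r.reverse = 0
        · rw [if_pos hd]
          rw [if_neg]
          intro hpf
          obtain ⟨hlt, h0⟩ := (hpre 0).1 (by simpa using hpf)
          exact hF1 0 hlt (by omega) h0
        · rw [if_neg hd]
          have h0 : r[0]'(by omega) = '0' := by
            have := hF2 (by omega) (by omega)
            rwa [getElem_congr rfl (show r.length - pvTailCount r.reverse - 1 = 0 by omega)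
              (by omega)] at this
          rw [if_pos (by simpa using (hpre 0).2 ⟨by omega, h0⟩)]
          have : r.length - pvTailCount r.reverse - 1 = 0 := by omega
          rw [this]; simp
    | succ j ih =>
        intro hlo hhi
        simp only [PySem.Chars.rfind.go]
        rcases Nat.lt_or_ge (j + 1) (r.length - pvTailCount r.reverse) with hlt | hge
        · have hj1 : j + 1 = r.length - pvTailCount r.reverse - 1 := by omega
          have hd1 : r.length - pvTailCount r.reverse - 1 < r.length := by omega
          have h0 : r[j+1]'(by omega) = '0' := by
            have := hF2 (by omega) hd1
            rwa [getElem_congr rfl hj1.symm (by omega)] at this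
          rw [if_pos ((hpre (j+1)).2 ⟨by omega, h0⟩)]
          rw [if_neg (by omega), hj1]
        · have hpf : ¬ (['0'].isPrefixOf (r.drop (j + 1))) = true := by
            rw [hpre (j+1)]
            rintro ⟨hlt, h0⟩
            exact hF1 (j+1) hlt hge h0
          rw [if_neg hpf]
          exact ih (by omega) (by omega)
  have := go_spec r.length (by omega) le_rfl
  rw [PySem.Chars.rfind, this]
  by_cases hd : r.length - pvTailCount r.reverse = 0
  · rw [if_pos hd, hd]; simp
  · rw [if_neg hd]; push_cast; omega

-- per-string equality
theorem pvOne_eq (s0 : String) : pvAOne s0 = pvBOne s0 := by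
  simp only [pvAOne, pvBOne]
  generalize s0.toList = l
  have hfree := pvBReduce_not_infix l
  have hclean : List.foldl pvAStep ([], 0) (pvBReduce l) = (pvBReduce l, 0) := by
    simpa using pvFold_clean (pvBReduce l) [] 0 (by simpa using hfree)
  have hstack : (List.foldl pvAStep ([], 0) l).1 = pvBReduce l := by
    rw [← pvBReduce_stack l, hclean]
  have hlen := pvFold_len l [] 0
  have hslen := congrArg List.length hstack
  set r := pvBReduce l with hr
  set st := List.foldl pvAStep ([], 0) l with hst
  set t1 := pvTailCount r.reverse with ht1
  have ht1le : t1 ≤ r.length := by rw [ht1]; simpa using pvTailCount_le r.reverse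
  have hcast : ((l.length : Int) - (r.length : Int)) = 3 * (st.2 : Int) := by
    simp only [List.length_nil] at hlen
    push_cast
    omega
  have hcount : PySem.Int.floordiv ((l.length : Int) - (r.length : Int)) 3 = (st.2 : Int) := by
    rw [PySem.Int.floordiv_eq_ediv_of_pos (by norm_num), hcast]
    exact Int.mul_ediv_cancel_left _ (by norm_num)
  have hrf : PySem.Chars.rfind r ['0'] + 1 = ((r.length - t1 : Nat) : Int) := pvRfind_eq r
  have h3 : ((r.length : Int) - PySem.Chars.rfind r ['0'] - 1) = (t1 : Int) := by omega
  rw [hstack, hrf, hcount, h3, Int.toNat_natCast, Int.toNat_natCast,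
    PySem.List.slice_to_natCast]

-- ===== VERDICT (by name: the statement is the Claim_ definition above) =====
theorem solution_spec : Claim_equal_solution := by
  intro s _
  unfold Spec_solution solution solution_alt
  exact List.map_congr_left (fun t _ => pvOne_eq t)
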